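-- pv_equiv track=rewrite | github.com/Poojitha-Thulluru/EvenNumbersInARange | even_numbers_in_range.py | get_even_array
-- ===== SOURCE A (Python) =====
-- def get_even_array(num_array: list) -> list:
--     arr_even = [0 if num_array[0] % 2 == 1 else 1]
--     for index in range(1, len(num_array)):
--         if num_array[index] % 2 == 0:
--             arr_even.append(arr_even[index - 1] + 1)
--         else:
--             arr_even.append(arr_even[index - 1])
--     return arr_even
-- ===== SOURCE B (Python) =====
-- def get_even_array(num_array: list) -> list:
--     # Different algorithm: locate the positions of even elements, then emit the
--     # answer as run-length blocks of constant counts between consecutive even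
--     # positions, instead of A's per-element accumulation.
--     n = len(num_array)
--     positions = [i for i, v in enumerate(num_array) if v % 2 == 0]
--     out = []
--     k = 0
--     prev = 0
--     for p in positions:
--         out.extend([k] * (p - prev))
--         k += 1
--         prev = p
--     out.extend([k] * (n - prev))
--     return out
-- ===== Notes on version B (the rewrite author's own statement) =====
-- stated objective: alternative
-- what changed: B first collects the positions of the even elements and then emits the answer as run-length blocks of constant counts between consecutive even positions, instead of A's per-element loop that appends by re-reading the previous output cell by index; B returns [] on the empty list where A raises IndexError (excluded by Pre_).
-- outside the precondition, e.g. on get_even_array([]): A raises IndexError, B returns []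
import Mathlib
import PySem

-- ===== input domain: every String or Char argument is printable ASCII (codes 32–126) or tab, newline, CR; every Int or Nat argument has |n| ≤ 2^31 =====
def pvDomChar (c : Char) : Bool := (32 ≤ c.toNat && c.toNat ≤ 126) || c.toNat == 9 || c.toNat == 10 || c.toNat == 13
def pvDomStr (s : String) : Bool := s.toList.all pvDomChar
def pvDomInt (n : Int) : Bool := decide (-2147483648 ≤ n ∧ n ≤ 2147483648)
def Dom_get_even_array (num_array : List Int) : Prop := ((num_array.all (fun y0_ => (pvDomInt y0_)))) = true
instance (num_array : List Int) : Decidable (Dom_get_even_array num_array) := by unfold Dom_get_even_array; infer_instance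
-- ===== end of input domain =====

-- B collects the positions of the even elements and emits the answer as run-length blocks of
-- constant counts between consecutive even positions, instead of A's per-element accumulation;
-- B returns [] where A raises IndexError.

-- ===== PORT A =====
def get_even_array (num_array : List Int) : List Int :=
  match num_array with
  | [] => []  -- Python raises IndexError here (num_array[0]); excluded by Pre_
  | h :: _ =>
    (PySem.List.pyRange 1 (num_array.length : Int)).foldl
      (fun arr i =>
        if PySem.Int.mod ((PySem.List.pyGet? num_array i).getD 0) 2 == 0 then
          arr ++ [(PySem.List.pyGet? arr (i - 1)).getD 0 + 1]
        else
          arr ++ [(PySem.List.pyGet? arr (i - 1)).getD 0])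
      [if PySem.Int.mod h 2 == 1 then 0 else 1]

-- ===== PORT B =====
def get_even_array_alt (num_array : List Int) : List Int :=
  let n : Int := (num_array.length : Int)
  let positions : List Int := (PySem.List.enumerate num_array).filterMap
    (fun p => if PySem.Int.mod p.2 2 == 0 then some p.1 else none)
  let st := positions.foldl
    (fun (s : List Int × Int × Int) p =>
      (s.1 ++ List.replicate (p - s.2.2).toNat s.2.1, s.2.1 + 1, p))
    ([], 0, 0)
  st.1 ++ List.replicate (n - st.2.2).toNat st.2.1

-- ===== PRECONDITION & SPEC =====
-- Pre_ excludes only the empty list, on which A raises IndexError (num_array[0]).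
def Pre_get_even_array (num_array : List Int) : Prop := num_array ≠ []
instance (num_array : List Int) : Decidable (Pre_get_even_array num_array) := by unfold Pre_get_even_array; infer_instance
def pvWitness_get_even_array : List Int := [2, 3]

def Spec_get_even_array (num_array : List Int) (out : List Int) : Prop := out = get_even_array_alt num_array
instance (num_array : List Int) (out : List Int) : Decidable (Spec_get_even_array num_array out) := by unfold Spec_get_even_array; infer_instance

-- ===== CLAIM (what is proved, stated in full; the proofs are below) =====
def Claim_equal_get_even_array : Prop := ∀ (num_array : List Int), Dom_get_even_array num_array → Pre_get_even_array num_array → Spec_get_even_array num_array (get_even_array num_array)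

-- ===== LEMMAS AND PROOFS =====

-- evenness indicator: 1 for even, 0 for odd
def evInd (n : Int) : Int := 1 - PySem.Int.mod n 2

def sumEv (xs : List Int) : Int := (xs.map evInd).sum

theorem sumEv_cons (a : Int) (as : List Int) : sumEv (a :: as) = evInd a + sumEv as := by
  rw [sumEv, sumEv, List.map_cons, List.sum_cons]

-- running prefix counts of evens, starting from s (reference semantics for both ports)
def pref (s : Int) : List Int → List Int
  | [] => []
  | x :: t => (s + evInd x) :: pref (s + evInd x) t

theorem pref_append (as bs : List Int) : ∀ s, pref s (as ++ bs) = pref s as ++ pref (s + sumEv as) bs := by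
  induction as with
  | nil => intro s; simp [pref, sumEv]
  | cons a as ih =>
    intro s
    simp only [List.cons_append, pref, ih]
    have hs : s + evInd a + sumEv as = s + sumEv (a :: as) := by rw [sumEv_cons]; ring
    rw [hs]

theorem length_pref (s : Int) (xs : List Int) : (pref s xs).length = xs.length := by
  induction xs generalizing s with
  | nil => rfl
  | cons x t ih => simp [pref, ih]

theorem pref_getElem (xs : List Int) : ∀ (s : Int) (j : Nat) (h : j < xs.length),
    (pref s xs)[j]'(by rw [length_pref]; exact h) = s + sumEv (xs.take (j + 1)) := by
  induction xs with
  | nil => intro s j h; simp at h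
  | cons x t ih =>
    intro s j h
    cases j with
    | zero => simp [pref, sumEv]
    | succ j =>
      have hj : j < t.length := by simpa using h
      simp only [pref, List.getElem_cons_succ, List.take_succ_cons]
      rw [ih (s + evInd x) j hj, sumEv_cons]
      ring

theorem evInd_of_mod_zero {v : Int} (h : PySem.Int.mod v 2 = 0) : evInd v = 1 := by
  rw [evInd, h]; norm_num

theorem evInd_of_mod_one {v : Int} (h : PySem.Int.mod v 2 = 1) : evInd v = 0 := by
  rw [evInd, h]; norm_num

-- ---- A-side: the fused loop computes pref 0 ----

theorem A_inv (x : Int) (t : List Int) (k : Nat) (hk : k ≤ t.length) :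
    (PySem.List.pyRange 1 (1 + (k : Int))).foldl
      (fun arr i =>
        if PySem.Int.mod ((PySem.List.pyGet? (x :: t) i).getD 0) 2 == 0 then
          arr ++ [(PySem.List.pyGet? arr (i - 1)).getD 0 + 1]
        else
          arr ++ [(PySem.List.pyGet? arr (i - 1)).getD 0])
      [if PySem.Int.mod x 2 == 1 then 0 else 1]
      = pref 0 ((x :: t).take (k + 1)) := by
  induction k with
  | zero =>
    have h0 : (1 + ((0 : Nat) : Int)) = 1 := by simp
    rw [h0]
    have hempty : PySem.List.pyRange 1 1 = ([] : List Int) := by decide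
    rw [hempty, List.foldl_nil]
    rcases PySem.Int.mod_two_eq x with h | h
    · rw [h]
      norm_num [pref, evInd_of_mod_zero h]
    · rw [h]
      norm_num [pref, evInd_of_mod_one h]
  | succ k ih =>
    have hk' : k ≤ t.length := Nat.le_of_succ_le hk
    have hklt : k < t.length := hk
    have hrange : PySem.List.pyRange 1 (1 + ((k + 1 : Nat) : Int))
        = PySem.List.pyRange 1 (1 + (k : Int)) ++ [1 + (k : Int)] := by
      have h1 : (1 : Int) ≤ 1 + (k : Int) := by omega
      have h2 : (1 : Int) + ((k + 1 : Nat) : Int) = (1 + (k : Int)) + 1 := by omega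
      rw [h2, PySem.List.pyRange_one_succ_right h1]
    rw [hrange, List.foldl_append, ih hk', List.foldl_cons, List.foldl_nil]
    have hget : PySem.List.pyGet? (x :: t) (1 + (k : Int)) = some (t[k]'hklt) := by
      have hcast : (1 : Int) + (k : Int) = ((k + 1 : Nat) : Int) := by omega
      rw [hcast, PySem.List.pyGet?_natCast]
      simp [List.getElem?_cons_succ, List.getElem?_eq_getElem hklt]
    have hlen : (pref 0 ((x :: t).take (k + 1))).length = k + 1 := by
      rw [length_pref, List.length_take]
      simp only [List.length_cons]
      omega
    have hprev : PySem.List.pyGet? (pref 0 ((x :: t).take (k + 1))) (1 + (k : Int) - 1)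
        = some (0 + sumEv ((x :: t).take (k + 1))) := by
      have h1 : (1 : Int) + (k : Int) - 1 = ((k : Nat) : Int) := by omega
      rw [h1, PySem.List.pyGet?_natCast]
      have hk2 : k < (pref 0 ((x :: t).take (k + 1))).length := by omega
      rw [List.getElem?_eq_getElem hk2]
      congr 1
      rw [pref_getElem ((x :: t).take (k + 1)) 0 k (by rw [List.length_take]; simp only [List.length_cons]; omega)]
      congr 2
      rw [List.take_take]
      congr 1
      omega
    have htake : (x :: t).take (k + 1 + 1) = (x :: t).take (k + 1) ++ [t[k]'hklt] := by
      rw [List.take_add_one, List.getElem?_eq_getElem (by simpa using Nat.succ_lt_succ hklt)]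
      simp
    rw [hget, hprev, htake, pref_append]
    simp only [Option.getD_some, pref]
    rcases PySem.Int.mod_two_eq (t[k]'hklt) with h | h
    · rw [h, evInd_of_mod_zero h]
      norm_num
    · rw [h, evInd_of_mod_one h]
      norm_num

-- ---- B-side: positions + run-length emission computes pref 0 ----

-- positions of even elements (what B's comprehension builds), with enumeration start s
def posOf (s : Int) (xs : List Int) : List Int :=
  (PySem.List.enumerate xs s).filterMap
    (fun p => if PySem.Int.mod p.2 2 == 0 then some p.1 else none)

-- pure recursion for B's fold plus final tail
def emit (k prev : Int) (n : Int) : List Int → List Int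
  | [] => List.replicate (n - prev).toNat k
  | p :: ps => List.replicate (p - prev).toNat k ++ emit (k + 1) p n ps

theorem B_fold (ps : List Int) : ∀ (acc : List Int) (k prev n : Int),
    (let st := ps.foldl
        (fun (s : List Int × Int × Int) p =>
          (s.1 ++ List.replicate (p - s.2.2).toNat s.2.1, s.2.1 + 1, p))
        (acc, k, prev)
     st.1 ++ List.replicate (n - st.2.2).toNat st.2.1)
    = acc ++ emit k prev n ps := by
  induction ps with
  | nil => intro acc k prev n; simp [emit]
  | cons p ps ih =>
    intro acc k prev n
    simp only [List.foldl_cons]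
    rw [ih]
    simp [emit]

theorem posOf_cons (s : Int) (x : Int) (t : List Int) :
    posOf s (x :: t) = (if PySem.Int.mod x 2 == 0 then [s] else []) ++ posOf (s + 1) t := by
  rw [posOf, PySem.List.enumerate_cons, List.filterMap_cons]
  cases h : (PySem.Int.mod x 2 == 0) <;>
    simp only [Bool.false_eq_true, if_false, if_true, List.nil_append, List.singleton_append] <;>
    rfl

theorem posOf_shift (t : List Int) : ∀ s, posOf (s + 1) t = (posOf s t).map (· + 1) := by
  induction t with
  | nil => intro s; simp [posOf, PySem.List.enumerate_nil]
  | cons x t ih =>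
    intro s
    rw [posOf_cons, posOf_cons, List.map_append, ← ih, ih (s + 1)]
    cases h : (PySem.Int.mod x 2 == 0) <;>
      simp only [Bool.false_eq_true, if_false, if_true, List.map_nil, List.map_cons]

theorem posOf_nonneg (t : List Int) : ∀ s, 0 ≤ s → ∀ p ∈ posOf s t, 0 ≤ p := by
  induction t with
  | nil => intro s _ p hp; simp [posOf, PySem.List.enumerate_nil] at hp
  | cons x t ih =>
    intro s hs p hp
    rw [posOf_cons] at hp
    rcases List.mem_append.1 hp with hp | hp
    · cases h : (PySem.Int.mod x 2 == 0) <;> rw [h] at hp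
      · simp at hp
      · simp at hp; omega
    · exact ih (s + 1) (by omega) p hp

theorem emit_shift (ps : List Int) : ∀ k prev n,
    emit k (prev + 1) (n + 1) (ps.map (· + 1)) = emit k prev n ps := by
  induction ps with
  | nil =>
    intro k prev n
    simp only [List.map_nil, emit]
    congr 1
    omega
  | cons p ps ih =>
    intro k prev n
    simp only [List.map_cons, emit, ih]
    congr 2
    omega

theorem emit_cons_shift (ps : List Int) (hps : ∀ p ∈ ps, 0 ≤ p) (k n : Int) (hn : 0 ≤ n) :
    emit k 0 (n + 1) (ps.map (· + 1)) = k :: emit k 0 n ps := by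
  cases ps with
  | nil =>
    simp only [List.map_nil, emit]
    have h : (n + 1 - 0).toNat = (n - 0).toNat + 1 := by omega
    rw [h, List.replicate_succ]
  | cons p ps' =>
    have hp : 0 ≤ p := hps p (List.mem_cons_self ..)
    simp only [List.map_cons, emit]
    have h1 : (p + 1 - 0).toNat = (p - 0).toNat + 1 := by omega
    rw [h1, List.replicate_succ, List.cons_append]
    congr 1
    have := emit_shift ps' (k + 1) p n
    simpa using this

theorem emit_eq_pref (t : List Int) : ∀ s, emit s 0 (t.length : Int) (posOf 0 t) = pref s t := by
  induction t with
  | nil => intro s; simp [posOf, PySem.List.enumerate_nil, emit, pref]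
  | cons x t ih =>
    intro s
    rw [posOf_cons]
    have hshift : posOf (0 + 1 : Int) t = (posOf 0 t).map (· + 1) := by
      rw [posOf_shift]
    have hnn : ∀ p ∈ posOf 0 t, 0 ≤ p := posOf_nonneg t 0 le_rfl
    have hn : (0 : Int) ≤ (t.length : Int) := by positivity
    have hlen : ((x :: t).length : Int) = (t.length : Int) + 1 := by
      simp only [List.length_cons]; push_cast; ring
    rcases PySem.Int.mod_two_eq x with h | h
    · have hb : (PySem.Int.mod x 2 == 0) = true := by rw [h]; rfl
      rw [hb, hlen, hshift]
      simp only [if_true, List.singleton_append, emit]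
      simp only [show ((0 : Int) - 0).toNat = 0 from rfl, List.replicate_zero, List.nil_append]
      rw [emit_cons_shift _ hnn _ _ hn, ih (s + 1), pref, evInd_of_mod_zero h]
    · have hb : (PySem.Int.mod x 2 == 0) = false := by rw [h]; rfl
      rw [hb, hlen, hshift]
      simp only [Bool.false_eq_true, if_false, List.nil_append]
      rw [emit_cons_shift _ hnn _ _ hn, ih s, pref, evInd_of_mod_one h]
      simp

theorem alt_eq_pref (xs : List Int) : get_even_array_alt xs = pref 0 xs := by
  show (let st := (posOf 0 xs).foldl _ ([], 0, 0)
        st.1 ++ List.replicate ((xs.length : Int) - st.2.2).toNat st.2.1) = pref 0 xs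
  rw [B_fold, List.nil_append, emit_eq_pref]

-- ===== VERDICT (by name: the statement is the Claim_ definition above) =====
theorem get_even_array_spec : Claim_equal_get_even_array := by
  unfold Claim_equal_get_even_array
  intro num_array _ hpre
  unfold Spec_get_even_array
  match num_array, hpre with
  | x :: t, _ =>
    rw [alt_eq_pref]
    show (PySem.List.pyRange 1 ((x :: t).length : Int)).foldl _ _ = _
    have hlen : (((x :: t).length : Nat) : Int) = 1 + (t.length : Int) := by
      simp only [List.length_cons]; omega
    rw [hlen, A_inv x t t.length (le_refl _)]
    congr 1
    exact List.take_of_length_le (by simp)
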